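-- pv_equiv track=rewrite | github.com/alimobrem/pulse-agent | sre_agent/layout_engine.py | _pack_charts
-- ===== SOURCE A (Python) =====
-- def _pack_charts(
--     items: list[tuple[int, str, int, int]],
--     positions: dict[int, dict],
--     start_y: int,
-- ) -> int:
--     """Pack charts using bin-packing on 4-column grid."""
--     y = start_y
--     x = 0
--     row_h = 0
--
--     for orig_idx, _kind, w, h in items:
--         if x + w > 4:
--             y += row_h
--             x = 0
--             row_h = 0
--         positions[orig_idx] = {"x": x, "y": y, "w": w, "h": h}
--         row_h = max(row_h, h)
--         x += w
--
--     if row_h > 0: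
--         y += row_h
--
--     return y
-- ===== SOURCE B (Python) =====
-- def _pack_charts(
--     items: list,
--     positions: dict,
--     start_y: int,
-- ) -> int:
--     """Pack charts on the 4-column grid in two passes: group items into rows, then place rows."""
--     # pass 1: greedily group items into rows of total width <= 4 (oversized items alone)
--     rows = []
--     cur, cw = [], 0
--     for it in items:
--         w = it[2]
--         if cw + w > 4 and cur:
--             rows.append(cur)
--             cur, cw = [], 0
--         cur.append(it)
--         cw += w
--     if cur:
--         rows.append(cur)
--     # pass 2: place each row at its y, advance y by the row's height
--     y = start_y
--     for row in rows:
--         x = 0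
--         row_h = 0
--         for orig_idx, _kind, w, h in row:
--             positions[orig_idx] = {"x": x, "y": y, "w": w, "h": h}
--             x += w
--             row_h = max(row_h, h)
--         y += row_h
--     return y
-- ===== Notes on version B (the rewrite author's own statement) =====
-- stated objective: alternative
-- what changed: Replaces A's single stateful scan (mutable y/x/row_h with a mid-loop row-reset branch and a trailing row_h>0 fixup) by a two-pass decomposition: first greedily group items into rows of width <= 4, then place the rows one after another, adding each row's height; no trailing special case is needed.
import Mathlib
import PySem

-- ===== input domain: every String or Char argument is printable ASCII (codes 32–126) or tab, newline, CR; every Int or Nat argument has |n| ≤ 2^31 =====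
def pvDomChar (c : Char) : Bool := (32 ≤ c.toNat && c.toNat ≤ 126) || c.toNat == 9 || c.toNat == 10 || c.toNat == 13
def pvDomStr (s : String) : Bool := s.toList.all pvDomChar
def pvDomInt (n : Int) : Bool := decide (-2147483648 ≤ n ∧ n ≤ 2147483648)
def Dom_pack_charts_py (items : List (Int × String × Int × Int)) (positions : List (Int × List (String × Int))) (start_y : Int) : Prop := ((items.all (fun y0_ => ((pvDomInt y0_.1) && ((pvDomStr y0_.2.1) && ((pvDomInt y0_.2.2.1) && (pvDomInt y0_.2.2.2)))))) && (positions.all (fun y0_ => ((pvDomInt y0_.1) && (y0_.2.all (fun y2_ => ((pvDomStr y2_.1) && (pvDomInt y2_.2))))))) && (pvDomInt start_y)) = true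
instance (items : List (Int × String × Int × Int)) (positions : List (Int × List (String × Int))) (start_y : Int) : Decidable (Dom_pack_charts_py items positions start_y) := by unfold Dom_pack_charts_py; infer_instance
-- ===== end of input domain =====

-- B replaces A's single stateful scan by a two-pass decomposition (group into rows, then sum row
-- heights); equivalence is about the RETURN value only — both Pythons mutate `positions` identically.

-- ===== PORT A =====
-- A's loop over items with mutable state (y, x, row_h); the dict write to `positions` does not
-- affect the return value and is omitted.
def packA_loop (items : List (Int × String × Int × Int)) (y x row_h : Int) : Int :=
  match items with
  | [] => if row_h > 0 then y + row_h else y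
  | (_, _, w, h) :: rest =>
    -- `if x + w > 4: y += row_h; x = 0; row_h = 0`
    let s := if x + w > 4 then (y + row_h, (0 : Int), (0 : Int)) else (y, x, row_h)
    -- `row_h = max(row_h, h); x += w`
    packA_loop rest s.1 (s.2.1 + w) (max s.2.2 h)

def pack_charts_py (items : List (Int × String × Int × Int)) (positions : List (Int × List (String × Int))) (start_y : Int) : Int :=
  packA_loop items start_y 0 0

-- ===== PORT B =====
-- pass 1 of Source B: greedily group items into rows (cur = current row, cw = its width)
def buildRows (items : List (Int × String × Int × Int)) (cur : List (Int × String × Int × Int)) (cw : Int) : List (List (Int × String × Int × Int)) :=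
  match items with
  | [] => if cur.isEmpty then [] else [cur]
  | i :: rest =>
    if cw + i.2.2.1 > 4 ∧ ¬ cur.isEmpty then cur :: buildRows rest [i] i.2.2.1
    else buildRows rest (cur ++ [i]) (cw + i.2.2.1)

-- inner loop of pass 2: `row_h = max(row_h, h)` over a row (positions writes omitted, as in port A)
def rowHeight (row : List (Int × String × Int × Int)) : Int :=
  row.foldl (fun m it => max m it.2.2.2) 0

def pack_charts_py_alt (items : List (Int × String × Int × Int)) (positions : List (Int × List (String × Int))) (start_y : Int) : Int :=
  (buildRows items [] 0).foldl (fun y row => y + rowHeight row) start_y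

-- ===== PRECONDITION & SPEC =====
def Spec_pack_charts_py (items : List (Int × String × Int × Int)) (positions : List (Int × List (String × Int))) (start_y : Int) (out : Int) : Prop := out = pack_charts_py_alt items positions start_y
instance (items : List (Int × String × Int × Int)) (positions : List (Int × List (String × Int))) (start_y : Int) (out : Int) : Decidable (Spec_pack_charts_py items positions start_y out) := by unfold Spec_pack_charts_py; infer_instance

-- ===== CLAIM (what is proved, stated in full; the proofs are below) =====
def Claim_equal_pack_charts_py : Prop := ∀ (items : List (Int × String × Int × Int)) (positions : List (Int × List (String × Int))) (start_y : Int), Dom_pack_charts_py items positions start_y → Spec_pack_charts_py items positions start_y (pack_charts_py items positions start_y)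

-- ===== LEMMAS AND PROOFS =====

theorem rowHeight_nonneg (row : List (Int × String × Int × Int)) : 0 ≤ rowHeight row := by
  have h : ∀ (l : List (Int × String × Int × Int)) (a : Int), a ≤ l.foldl (fun m it => max m it.2.2.2) a := by
    intro l
    induction l with
    | nil => intro a; simp
    | cons i t ih =>
      intro a
      simp only [List.foldl]
      exact le_trans (le_max_left a i.2.2.2) (ih _)
  exact h row 0

theorem rowHeight_append (cur : List (Int × String × Int × Int)) (i : Int × String × Int × Int) :
    rowHeight (cur ++ [i]) = max (rowHeight cur) i.2.2.2 := by
  simp [rowHeight, List.foldl_append]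

theorem rowHeight_single (i : Int × String × Int × Int) : rowHeight [i] = max 0 i.2.2.2 := by
  simp [rowHeight]

-- main invariant: A's loop from state (y, cw, rowHeight cur) computes B's fold over the grouped rows
theorem packA_loop_eq (items : List (Int × String × Int × Int)) :
    ∀ (cur : List (Int × String × Int × Int)) (cw y : Int), (cur = [] → cw = 0) →
    packA_loop items y cw (rowHeight cur)
      = (buildRows items cur cw).foldl (fun y row => y + rowHeight row) y := by
  induction items with
  | nil =>
    intro cur cw y _
    by_cases hc : cur = []
    · subst hc
      simp [packA_loop, buildRows, rowHeight]
    · have h0 := rowHeight_nonneg cur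
      simp only [packA_loop, buildRows, List.isEmpty_iff, hc]
      rcases lt_or_eq_of_le h0 with h | h
      · simp [h]
      · simp [← h]
  | cons i rest ih =>
    intro cur cw y hcw
    obtain ⟨idx, k, w, h⟩ := i
    by_cases hb : cw + w > 4
    · by_cases hc : cur = []
      · -- empty current row: branch fires in A but adds row_h = 0; B keeps appending
        subst hc
        have hcw0 : cw = 0 := hcw rfl
        subst hcw0
        simp only [packA_loop, buildRows, hb, if_pos, List.isEmpty_nil, not_true, and_false,
          if_neg, not_false_iff]
        have : rowHeight ([] : List (Int × String × Int × Int)) = 0 := by simp [rowHeight]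
        rw [this]
        have := ih [(idx, k, w, h)] (0 + w) (y + 0) (by simp)
        simpa [rowHeight_single, zero_add, add_zero] using this
      · -- close the row: A adds rowHeight cur to y; B emits cur as a finished row
        simp only [packA_loop, buildRows, hb, if_pos, List.isEmpty_iff, hc, not_false_iff,
          and_true, List.foldl]
        have := ih [(idx, k, w, h)] (0 + w) (y + rowHeight cur) (by simp)
        simpa [rowHeight_single, zero_add] using this
    · -- item fits: both extend the current row
      simp only [packA_loop, buildRows, hb, if_neg, not_false_iff, false_and]
      have := ih (cur ++ [(idx, k, w, h)]) (cw + w) y (by simp)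
      rw [rowHeight_append] at this
      simpa using this

-- ===== VERDICT (by name: the statement is the Claim_ definition above) =====
theorem pack_charts_py_spec : Claim_equal_pack_charts_py := by
  intro items positions start_y _
  unfold Spec_pack_charts_py pack_charts_py pack_charts_py_alt
  have := packA_loop_eq items [] 0 start_y (fun _ => rfl)
  simpa [rowHeight] using this
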